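-- pv_equiv track=rewrite | github.com/nbavafa/Bioinformatics-Algorithms | greedyMotifSearch.py | scoringFunction
-- ===== SOURCE A (Python) =====
-- def scoringFunction(motifs, k):
--     score = 0
--     consensus = ""
--     for i in range(k):
--         dict = {"A": 0,
--                 "C": 0,
--                 "G": 0,
--                 "T": 0 }
--         for motif in motifs:
--             dict[motif[i]] = dict.get(motif[i]) + 1
--
--         consensus = consensus + max(dict, key=dict.get)
--
--     for motif in motifs:
--         score = score + hammingDistance(motif, consensus)
--
--     return score
--
-- def hammingDistance(text1, text2):
--     score = len(text1) - len(text2)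
--     for x in range(0, min(len(text1), len(text2))):
--         if (text1[x] != text2[x]):
--             score = score + 1
--     return score
-- ===== SOURCE B (Python) =====
-- def scoringFunction(motifs, k):
--     matched = 0
--     if k > 0:
--         for column in zip(*(m[:k] for m in motifs)):
--             matched += max(column.count(c) for c in "ACGT")
--     return sum(map(len, motifs)) - matched
-- ===== Notes on version B (the rewrite author's own statement) =====
-- stated objective: faster
-- what changed: B drops the consensus string and hammingDistance entirely: it transposes the (truncated) motifs into columns once with zip(*...), adds up the per-column maximum A/C/G/T count, and returns total characters minus that sum, using the identity score = sum(len(m)) - sum_i max_c count_i(c).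
import Mathlib
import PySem

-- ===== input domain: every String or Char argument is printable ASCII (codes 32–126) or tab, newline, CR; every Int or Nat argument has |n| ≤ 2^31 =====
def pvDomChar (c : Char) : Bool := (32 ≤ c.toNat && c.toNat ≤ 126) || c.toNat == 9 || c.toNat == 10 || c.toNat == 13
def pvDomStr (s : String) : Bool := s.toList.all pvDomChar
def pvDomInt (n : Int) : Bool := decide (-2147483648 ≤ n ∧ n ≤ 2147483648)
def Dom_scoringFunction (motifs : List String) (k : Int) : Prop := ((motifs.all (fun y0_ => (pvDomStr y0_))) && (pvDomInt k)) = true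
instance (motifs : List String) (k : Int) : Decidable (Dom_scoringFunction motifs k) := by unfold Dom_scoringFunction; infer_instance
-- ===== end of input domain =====

-- B replaces A's consensus-string + hammingDistance passes by one column-wise pass:
-- score = (total number of characters) - (sum over columns of the maximal A/C/G/T count).


-- ===== PORT A =====
def hammingDistance (text1 text2 : List Char) : Int :=
  (PySem.List.pyRange 0 (min (PySem.List.len text1) (PySem.List.len text2)) 1).foldl
    (fun score x =>
      if PySem.List.pyGetD text1 x 'A' ≠ PySem.List.pyGetD text2 x 'A' then score + 1 else score)
    (PySem.List.len text1 - PySem.List.len text2)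

-- the per-column {A,C,G,T} counting loop of A (dict.get(c) is None off the four keys: Python
-- raises TypeError on None + 1, and motif[i] raises IndexError when i is out of range — both
-- arms return d unchanged here and are excluded by Pre_)
def scoringDict (motifs : List String) (i : Int) : PySem.Dict Char Int :=
  motifs.foldl
    (fun d motif =>
      match PySem.Str.pyGet? motif i with
      | none => d
      | some ch =>
        match d.get? ch with
        | none => d
        | some v => d.insert ch (v + 1))
    (((((PySem.Dict.empty).insert 'A' 0).insert 'C' 0).insert 'G' 0).insert 'T' 0)

def scoringFunction (motifs : List String) (k : Int) : Int :=
  let consensus : List Char :=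
    (PySem.List.pyRange 0 k 1).foldl
      (fun consensus i =>
        match PySem.List.max? (scoringDict motifs i).keys
            (fun ch => ((scoringDict motifs i).get? ch).getD 0) with
        | some ch => consensus ++ [ch]
        | none => consensus)   -- unreachable: the dict always carries the four keys
      ([] : List Char)
  motifs.foldl (fun score motif => score + hammingDistance motif.toList consensus) 0

-- ===== PORT B =====
-- hand port of the builtin zip(*rows): the columns, cut at the shortest row
-- (exact: every produced index is below every row's length, so getD never takes its default)
def zipStar (rows : List (List Char)) : List (List Char) :=
  match rows with
  | [] => []
  | r0 :: _ =>
    (List.range (rows.foldl (fun acc r => min acc r.length) r0.length)).map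
      (fun j => rows.map (fun r => r.getD j 'A'))

-- max(column.count(c) for c in "ACGT")
def maxACGTCount (column : List Char) : Int :=
  (PySem.List.max?
    ((['A','C','G','T'] : List Char).map (fun ch => (PySem.List.count column ch : Int)))
    (fun v => v)).getD 0

def scoringFunction_alt (motifs : List String) (k : Int) : Int :=
  let matched : Int :=
    if k > 0 then
      (zipStar (motifs.map (fun m => PySem.List.slice m.toList none (some k)))).foldl
        (fun matched column => matched + maxACGTCount column) 0
    else 0
  (motifs.map (fun m => PySem.Str.len m)).sum - matched

-- ===== PRECONDITION & SPEC =====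
-- Pre_ excludes exactly the inputs where A raises: a motif shorter than k (IndexError on
-- motif[i]) or a non-ACGT character in the first k places (TypeError on None + 1).
def Pre_scoringFunction (motifs : List String) (k : Int) : Prop :=
  ∀ m ∈ motifs, k ≤ (m.toList.length : Int) ∧
    ((m.toList.take k.toNat).all (fun c => c == 'A' || c == 'C' || c == 'G' || c == 'T') = true)
instance (motifs : List String) (k : Int) : Decidable (Pre_scoringFunction motifs k) := by
  unfold Pre_scoringFunction; infer_instance

def pvWitness_scoringFunction : List String × Int := (["ACG", "TCG"], 2)

def Spec_scoringFunction (motifs : List String) (k : Int) (out : Int) : Prop := out = scoringFunction_alt motifs k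
instance (motifs : List String) (k : Int) (out : Int) : Decidable (Spec_scoringFunction motifs k out) := by unfold Spec_scoringFunction; infer_instance

-- ===== CLAIM (what is proved, stated in full; the proofs are below) =====
def Claim_equal_scoringFunction : Prop := ∀ (motifs : List String) (k : Int), Dom_scoringFunction motifs k → Pre_scoringFunction motifs k → Spec_scoringFunction motifs k (scoringFunction motifs k)

-- ===== LEMMAS AND PROOFS =====

def pvACGT : List Char := ['A', 'C', 'G', 'T']

-- the number of motifs whose i-th character is c
def pvCnt (ms : List String) (i : Int) (c : Char) : Int :=
  ((ms.countP (fun m => PySem.Str.pyGet? m i == some c) : Nat) : Int)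

-- a dict with exactly the four keys, in A's insertion order
def pvMk4 (a c g t : Int) : PySem.Dict Char Int :=
  ((((PySem.Dict.empty).insert 'A' a).insert 'C' c).insert 'G' g).insert 'T' t

-- the per-column maximum count, in B's evaluation order
def pvMax (ms : List String) (i : Int) : Int :=
  [pvCnt ms i 'C', pvCnt ms i 'G', pvCnt ms i 'T'].foldl max (pvCnt ms i 'A')

-- the column-i consensus character A picks
def pvE (ms : List String) (i : Int) : Char :=
  (PySem.List.max? (scoringDict ms i).keys
    (fun ch => ((scoringDict ms i).get? ch).getD 0)).getD 'A'

-- a column is "good" when every motif has an ACGT character there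
def pvGood (ms : List String) (i : Int) : Prop :=
  ∀ m ∈ ms, ∃ ch ∈ pvACGT, PySem.Str.pyGet? m i = some ch

lemma pvMk4_congr {a c g t a' c' g' t' : Int}
    (ha : a = a') (hc : c = c') (hg : g = g') (ht : t = t') :
    pvMk4 a c g t = pvMk4 a' c' g' t' := by rw [ha, hc, hg, ht]

lemma pvMk4_insert_A (a c g t v : Int) : (pvMk4 a c g t).insert 'A' v = pvMk4 v c g t := by
  simp [pvMk4, PySem.Dict.insert, PySem.Dict.empty]
lemma pvMk4_insert_C (a c g t v : Int) : (pvMk4 a c g t).insert 'C' v = pvMk4 a v g t := by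
  simp [pvMk4, PySem.Dict.insert, PySem.Dict.empty]
lemma pvMk4_insert_G (a c g t v : Int) : (pvMk4 a c g t).insert 'G' v = pvMk4 a c v t := by
  simp [pvMk4, PySem.Dict.insert, PySem.Dict.empty]
lemma pvMk4_insert_T (a c g t v : Int) : (pvMk4 a c g t).insert 'T' v = pvMk4 a c g v := by
  simp [pvMk4, PySem.Dict.insert, PySem.Dict.empty]

lemma pvMk4_get_A (a c g t : Int) : (pvMk4 a c g t).get? 'A' = some a := by
  simp [pvMk4, PySem.Dict.get?, PySem.Dict.insert, PySem.Dict.empty]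
lemma pvMk4_get_C (a c g t : Int) : (pvMk4 a c g t).get? 'C' = some c := by
  simp [pvMk4, PySem.Dict.get?, PySem.Dict.insert, PySem.Dict.empty]
lemma pvMk4_get_G (a c g t : Int) : (pvMk4 a c g t).get? 'G' = some g := by
  simp [pvMk4, PySem.Dict.get?, PySem.Dict.insert, PySem.Dict.empty]
lemma pvMk4_get_T (a c g t : Int) : (pvMk4 a c g t).get? 'T' = some t := by
  simp [pvMk4, PySem.Dict.get?, PySem.Dict.insert, PySem.Dict.empty]

lemma pvMk4_keys (a c g t : Int) : (pvMk4 a c g t).keys = pvACGT := by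
  simp [pvMk4, pvACGT, PySem.Dict.keys, PySem.Dict.insert, PySem.Dict.empty]

lemma pvCnt_cons_eq {m : String} {ms : List String} {i : Int} {c : Char}
    (h : PySem.Str.pyGet? m i = some c) : pvCnt (m :: ms) i c = pvCnt ms i c + 1 := by
  have h' : PySem.List.pyGet? m.toList i = some c := by simpa using h
  unfold pvCnt
  rw [List.countP_cons]
  simp [h']

lemma pvCnt_cons_ne {m : String} {ms : List String} {i : Int} {c : Char}
    (h : PySem.Str.pyGet? m i ≠ some c) : pvCnt (m :: ms) i c = pvCnt ms i c := by
  have h' : ¬ PySem.List.pyGet? m.toList i = some c := by simpa using h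
  unfold pvCnt
  rw [List.countP_cons]
  simp [h', beq_iff_eq]

lemma pv_foldl_dict (ms : List String) (i : Int) :
    ∀ (a c g t : Int), pvGood ms i →
      ms.foldl
        (fun d motif =>
          match PySem.Str.pyGet? motif i with
          | none => d
          | some ch =>
            match d.get? ch with
            | none => d
            | some v => d.insert ch (v + 1))
        (pvMk4 a c g t)
      = pvMk4 (a + pvCnt ms i 'A') (c + pvCnt ms i 'C') (g + pvCnt ms i 'G') (t + pvCnt ms i 'T') := by
  induction ms with
  | nil => intro a c g t _; simp [pvCnt]
  | cons m ms ih =>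
    intro a c g t h
    obtain ⟨ch, hmem, heq⟩ := h m (by simp)
    have hgood : pvGood ms i := fun m' hm' => h m' (by simp [hm'])
    simp only [List.foldl_cons, heq]
    rcases (by simpa [pvACGT] using hmem : ch = 'A' ∨ ch = 'C' ∨ ch = 'G' ∨ ch = 'T') with
      rfl | rfl | rfl | rfl
    · simp only [pvMk4_get_A, pvMk4_insert_A]
      rw [ih (a + 1) c g t hgood,
        pvCnt_cons_eq heq,
        pvCnt_cons_ne (c := 'C') (by rw [heq]; decide),
        pvCnt_cons_ne (c := 'G') (by rw [heq]; decide),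
        pvCnt_cons_ne (c := 'T') (by rw [heq]; decide)]
      exact pvMk4_congr (by omega) rfl rfl rfl
    · simp only [pvMk4_get_C, pvMk4_insert_C]
      rw [ih a (c + 1) g t hgood,
        pvCnt_cons_eq heq,
        pvCnt_cons_ne (c := 'A') (by rw [heq]; decide),
        pvCnt_cons_ne (c := 'G') (by rw [heq]; decide),
        pvCnt_cons_ne (c := 'T') (by rw [heq]; decide)]
      exact pvMk4_congr rfl (by omega) rfl rfl
    · simp only [pvMk4_get_G, pvMk4_insert_G]
      rw [ih a c (g + 1) t hgood,
        pvCnt_cons_eq heq,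
        pvCnt_cons_ne (c := 'A') (by rw [heq]; decide),
        pvCnt_cons_ne (c := 'C') (by rw [heq]; decide),
        pvCnt_cons_ne (c := 'T') (by rw [heq]; decide)]
      exact pvMk4_congr rfl rfl (by omega) rfl
    · simp only [pvMk4_get_T, pvMk4_insert_T]
      rw [ih a c g (t + 1) hgood,
        pvCnt_cons_eq heq,
        pvCnt_cons_ne (c := 'A') (by rw [heq]; decide),
        pvCnt_cons_ne (c := 'C') (by rw [heq]; decide),
        pvCnt_cons_ne (c := 'G') (by rw [heq]; decide)]
      exact pvMk4_congr rfl rfl rfl (by omega)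

lemma pv_scoringDict_eq (ms : List String) (i : Int) (h : pvGood ms i) :
    scoringDict ms i
      = pvMk4 (pvCnt ms i 'A') (pvCnt ms i 'C') (pvCnt ms i 'G') (pvCnt ms i 'T') := by
  have h0 : (((((PySem.Dict.empty).insert 'A' (0 : Int)).insert 'C' 0).insert 'G' 0).insert 'T' 0)
      = pvMk4 0 0 0 0 := rfl
  unfold scoringDict
  rw [h0, pv_foldl_dict ms i 0 0 0 0 h]
  simp

lemma pv_key_pvE (ms : List String) (i : Int) (h : pvGood ms i) :
    pvCnt ms i (pvE ms i) = pvMax ms i := by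
  have hd := pv_scoringDict_eq ms i h
  rcases hmax : PySem.List.max? (scoringDict ms i).keys
      (fun ch => ((scoringDict ms i).get? ch).getD 0) with _ | e
  · exfalso
    have hkeys : (scoringDict ms i).keys = [] := (PySem.List.max?_eq_none_iff _ _).mp hmax
    rw [hd, pvMk4_keys] at hkeys
    simp [pvACGT] at hkeys
  · have hEe : pvE ms i = e := by unfold pvE; rw [hmax]; rfl
    have hemem' : e ∈ (scoringDict ms i).keys := PySem.List.max?_mem hmax
    have hemem : e ∈ pvACGT := by rwa [hd, pvMk4_keys] at hemem'
    have hismax := PySem.List.max?_isMax hmax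
    have hkeyval : ∀ ch ∈ pvACGT, ((scoringDict ms i).get? ch).getD 0 = pvCnt ms i ch := by
      intro ch hch
      rw [hd]
      rcases (by simpa [pvACGT] using hch : ch = 'A' ∨ ch = 'C' ∨ ch = 'G' ∨ ch = 'T') with
        rfl | rfl | rfl | rfl <;>
        simp [pvMk4_get_A, pvMk4_get_C, pvMk4_get_G, pvMk4_get_T]
    have key_le : ∀ ch ∈ pvACGT, pvCnt ms i ch ≤ pvCnt ms i e := by
      intro ch hch
      have h1 := hismax ch (by rw [hd, pvMk4_keys]; exact hch)
      rwa [hkeyval ch hch, hkeyval e hemem] at h1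
    have hle1 : pvCnt ms i e ≤ pvMax ms i := by
      have hlf := PySem.List.le_foldl_max [pvCnt ms i 'C', pvCnt ms i 'G', pvCnt ms i 'T']
        (pvCnt ms i 'A')
      rcases (by simpa [pvACGT] using hemem : e = 'A' ∨ e = 'C' ∨ e = 'G' ∨ e = 'T') with
        rfl | rfl | rfl | rfl
      · exact hlf.1
      · exact hlf.2 _ (by simp)
      · exact hlf.2 _ (by simp)
      · exact hlf.2 _ (by simp)
    have hle2 : pvMax ms i ≤ pvCnt ms i e := by
      have hfm := PySem.List.foldl_max_mem [pvCnt ms i 'C', pvCnt ms i 'G', pvCnt ms i 'T']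
        (pvCnt ms i 'A')
      have hm2 : pvMax ms i = pvCnt ms i 'A' ∨ pvMax ms i = pvCnt ms i 'C'
          ∨ pvMax ms i = pvCnt ms i 'G' ∨ pvMax ms i = pvCnt ms i 'T' := by
        simpa [pvMax] using hfm
      rcases hm2 with hm' | hm' | hm' | hm' <;> rw [hm']
      · exact key_le 'A' (by simp [pvACGT])
      · exact key_le 'C' (by simp [pvACGT])
      · exact key_le 'G' (by simp [pvACGT])
      · exact key_le 'T' (by simp [pvACGT])
    rw [hEe]
    omega

-- A's consensus is the list of per-column consensus characters
lemma pv_consensus_eq (ms : List String) (k : Int)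
    (h : ∀ i, 0 ≤ i → i < k → pvGood ms i) :
    (PySem.List.pyRange 0 k 1).foldl
      (fun consensus i =>
        match PySem.List.max? (scoringDict ms i).keys
            (fun ch => ((scoringDict ms i).get? ch).getD 0) with
        | some ch => consensus ++ [ch]
        | none => consensus)
      ([] : List Char)
    = (PySem.List.pyRange 0 k 1).map (pvE ms) := by
  have hpt : ∀ (acc : List Char), ∀ i ∈ PySem.List.pyRange 0 k 1,
      (fun (consensus : List Char) (i : Int) =>
        match PySem.List.max? (scoringDict ms i).keys
            (fun ch => ((scoringDict ms i).get? ch).getD 0) with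
        | some ch => consensus ++ [ch]
        | none => consensus) acc i
      = (fun (consensus : List Char) (i : Int) => consensus ++ [pvE ms i]) acc i := by
    intro acc i hi
    have hmem := PySem.List.mem_pyRange_one.mp hi
    have hgood := h i hmem.1 hmem.2
    have hd := pv_scoringDict_eq ms i hgood
    rcases hmax : PySem.List.max? (scoringDict ms i).keys
        (fun ch => ((scoringDict ms i).get? ch).getD 0) with _ | e
    · exfalso
      have hkeys : (scoringDict ms i).keys = [] := (PySem.List.max?_eq_none_iff _ _).mp hmax
      rw [hd, pvMk4_keys] at hkeys
      simp [pvACGT] at hkeys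
    · have hEe : pvE ms i = e := by unfold pvE; rw [hmax]; rfl
      simp only [hmax, hEe]
  rw [PySem.List.foldl_congr_mem _ _ _ _ hpt,
    PySem.List.foldl_append_singleton_eq_map, List.nil_append]

-- the mismatch-counting loop is the sum of 0/1 indicators
lemma pv_foldl_mis (t1 t2 : List Char) (l : List Int) (init : Int) :
    l.foldl
      (fun score x =>
        if PySem.List.pyGetD t1 x 'A' ≠ PySem.List.pyGetD t2 x 'A' then score + 1 else score)
      init
    = init + (l.map (fun x =>
        if PySem.List.pyGetD t1 x 'A' ≠ PySem.List.pyGetD t2 x 'A' then (1 : Int) else 0)).sum := by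
  induction l generalizing init with
  | nil => simp
  | cons x xs ih =>
    rw [List.foldl_cons, List.map_cons, List.sum_cons]
    by_cases hx : PySem.List.pyGetD t1 x 'A' ≠ PySem.List.pyGetD t2 x 'A'
    · rw [if_pos hx, if_pos hx, ih]
      omega
    · rw [if_neg hx, if_neg hx, ih]
      omega

-- a foldl accumulating sums
lemma pv_foldl_add {α : Type} (l : List α) (f : α → Int) (init : Int) :
    l.foldl (fun s x => s + f x) init = init + (l.map f).sum := by
  induction l generalizing init with
  | nil => simp
  | cons x xs ih => simp [ih]; omega

lemma pv_sum_map_add {α : Type} (l : List α) (f g : α → Int) :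
    (l.map (fun x => f x + g x)).sum = (l.map f).sum + (l.map g).sum := by
  induction l with
  | nil => simp
  | cons x xs ih => simp [ih]; omega

lemma pv_sum_sub_right {α : Type} (l : List α) (f : α → Int) (c : Int) :
    (l.map (fun x => f x - c)).sum = (l.map f).sum - l.length * c := by
  induction l with
  | nil => simp
  | cons x xs ih =>
    rw [List.map_cons, List.sum_cons, ih, List.map_cons, List.sum_cons, List.length_cons]
    push_cast
    ring

lemma pv_sum_sub_left {α : Type} (l : List α) (c : Int) (g : α → Int) :
    (l.map (fun x => c - g x)).sum = l.length * c - (l.map g).sum := by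
  induction l with
  | nil => simp
  | cons x xs ih =>
    rw [List.map_cons, List.sum_cons, ih, List.map_cons, List.sum_cons, List.length_cons]
    push_cast
    ring

-- exchanging a double sum
lemma pv_sum_comm {α β : Type} (xs : List α) (ys : List β) (f : α → β → Int) :
    (xs.map (fun a => (ys.map (f a)).sum)).sum
      = (ys.map (fun b => (xs.map (fun a => f a b)).sum)).sum := by
  induction xs with
  | nil => simp
  | cons a t ih =>
    simp only [List.map_cons, List.sum_cons, ih]
    rw [← pv_sum_map_add]

-- column sum of mismatch indicators
lemma pv_col_sum (ms : List String) (i : Int) (e : Char) :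
    (ms.map (fun m => if PySem.Str.pyGet? m i ≠ some e then (1 : Int) else 0)).sum
      = ms.length - pvCnt ms i e := by
  induction ms with
  | nil => simp [pvCnt]
  | cons m ms ih =>
    rw [List.map_cons, List.sum_cons, ih, List.length_cons]
    by_cases h : PySem.Str.pyGet? m i = some e
    · rw [pvCnt_cons_eq h, if_neg (not_not_intro h)]
      push_cast
      ring
    · rw [pvCnt_cons_ne h, if_pos h]
      push_cast
      ring

lemma pv_hamming (m : String) (K : Nat) (hlen : K ≤ m.toList.length) (E : Int → Char) :
    hammingDistance m.toList ((PySem.List.pyRange 0 (K : Int) 1).map E)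
      = ((m.toList.length : Int) - K)
        + ((PySem.List.pyRange 0 (K : Int) 1).map
            (fun i => if PySem.Str.pyGet? m i ≠ some (E i) then (1 : Int) else 0)).sum := by
  have hlcons : ((PySem.List.pyRange 0 (K : Int) 1).map E).length = K := by
    simp [PySem.List.length_pyRange_one]
  unfold hammingDistance
  have hmin : min (PySem.List.len m.toList)
      (PySem.List.len ((PySem.List.pyRange 0 (K : Int) 1).map E)) = (K : Int) := by
    simp only [PySem.List.len_eq, hlcons]
    omega
  have hinit : PySem.List.len m.toList
      - PySem.List.len ((PySem.List.pyRange 0 (K : Int) 1).map E)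
      = (m.toList.length : Int) - K := by
    simp only [PySem.List.len_eq, hlcons]
  rw [hmin, hinit, pv_foldl_mis]
  congr 1
  refine congrArg List.sum (List.map_congr_left ?_)
  intro i hi
  have hmem := PySem.List.mem_pyRange_one.mp hi
  have h0 : (0 : Int) ≤ i := hmem.1
  have hiK : i < (K : Int) := hmem.2
  have htn : i.toNat < m.toList.length := by omega
  have hg1 : PySem.List.pyGetD m.toList i 'A' = m.toList[i.toNat] :=
    PySem.List.pyGetD_eq_getElem m.toList 'A' h0 (by omega)
  have hg2 : PySem.List.pyGetD ((PySem.List.pyRange 0 (K : Int) 1).map E) i 'A' = E i :=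
    PySem.List.pyGetD_map_pyRange_of_nonneg E (K : Int) i 'A' h0 hiK
  have hg3 : PySem.Str.pyGet? m i = some m.toList[i.toNat] := by
    have hi' : i = ((i.toNat : Nat) : Int) := by omega
    have hg : PySem.Str.pyGet? m ((i.toNat : Nat) : Int) = some m.toList[i.toNat] := by
      rw [PySem.Str.pyGet?_natCast]
      simp
    rwa [← hi'] at hg
  rw [hg1, hg2, hg3]
  simp

-- the count over a mapped column is pvCnt
lemma pv_count_map (ms : List String) (f : String → Char) (i : Int) (c : Char)
    (h : ∀ m ∈ ms, PySem.Str.pyGet? m i = some (f m)) :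
    ((PySem.List.count (ms.map f) c : Nat) : Int) = pvCnt ms i c := by
  induction ms with
  | nil => simp [pvCnt, PySem.List.count]
  | cons m ms ih =>
    have hm := h m (by simp)
    have ht : ∀ m' ∈ ms, PySem.Str.pyGet? m' i = some (f m') := fun m' hm' => h m' (by simp [hm'])
    by_cases hc : f m = c
    · rw [List.map_cons, PySem.List.count_eq, List.count_cons, ← PySem.List.count_eq,
        pvCnt_cons_eq (by rw [hm, hc]), ← ih ht]
      simp [hc]
    · rw [List.map_cons, PySem.List.count_eq, List.count_cons, ← PySem.List.count_eq,
        pvCnt_cons_ne (by rw [hm]; simp [hc]), ← ih ht]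
      simp [hc]

lemma pv_foldl_min (rows : List (List Char)) (K : Nat) (h : ∀ r ∈ rows, r.length = K) :
    rows.foldl (fun acc r => min acc r.length) K = K := by
  induction rows with
  | nil => rfl
  | cons r rs ih =>
    have hr := h r (by simp)
    simp only [List.foldl_cons, hr, min_self]
    exact ih (fun r' hr' => h r' (by simp [hr']))

lemma pv_zipStar_eq (r0 : List Char) (rs : List (List Char)) (K : Nat)
    (h : ∀ r ∈ r0 :: rs, r.length = K) :
    zipStar (r0 :: rs)
      = (List.range K).map (fun (j : Nat) => (r0 :: rs).map (fun r => r.getD j 'A')) := by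
  have hdef : zipStar (r0 :: rs)
      = (List.range ((r0 :: rs).foldl (fun acc r => min acc r.length) r0.length)).map
          (fun (j : Nat) => (r0 :: rs).map (fun r => r.getD j 'A')) := rfl
  rw [hdef, show r0.length = K from h r0 (by simp), pv_foldl_min _ K h]

lemma pv_maxACGT_eq (ms : List String) (j : Nat) (K : Nat) (hj : j < K)
    (hlen : ∀ m ∈ ms, K ≤ m.toList.length) :
    maxACGTCount (ms.map (fun m => (m.toList.take K).getD j 'A')) = pvMax ms (j : Int) := by
  have hget : ∀ m ∈ ms, PySem.Str.pyGet? m (j : Int)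
      = some ((m.toList.take K).getD j 'A') := by
    intro m hm
    have hlm := hlen m hm
    have hjl : j < m.toList.length := by omega
    have h1 : (m.toList.take K).getD j 'A' = m.toList[j] := by
      have h2 : (m.toList.take K)[j]? = some m.toList[j] := by
        rw [List.getElem?_take_of_lt hj]
        exact List.getElem?_eq_getElem hjl
      simp [List.getD, h2]
    rw [h1, PySem.Str.pyGet?_natCast]
    simp
  have hcnt : ∀ c : Char,
      ((PySem.List.count (ms.map (fun m => (m.toList.take K).getD j 'A')) c : Nat) : Int)
        = pvCnt ms (j : Int) c :=
    fun c => pv_count_map ms _ (j : Int) c hget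
  unfold maxACGTCount
  simp only [List.map_cons, List.map_nil]
  rw [PySem.List.max?_id_cons]
  simp only [Option.getD_some]
  unfold pvMax
  simp only [List.foldl_cons, List.foldl_nil]
  rw [← hcnt 'A', ← hcnt 'C', ← hcnt 'G', ← hcnt 'T']

-- ===== VERDICT (by name: the statement is the Claim_ definition above) =====
theorem scoringFunction_spec : Claim_equal_scoringFunction := by
  intro motifs k hdom hpre
  unfold Spec_scoringFunction
  have hlen : ∀ m ∈ motifs, k ≤ (m.toList.length : Int) := fun m hm => (hpre m hm).1
  by_cases hkpos : 0 < k
  · -- k > 0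
    set K := k.toNat with hKdef
    have hk : ((K : Nat) : Int) = k := Int.toNat_of_nonneg (by omega)
    have hgood : ∀ i : Int, 0 ≤ i → i < k → pvGood motifs i := by
      intro i h0 hik m hm
      obtain ⟨hlm, hchars⟩ := hpre m hm
      have hlt : i.toNat < m.toList.length := by omega
      refine ⟨m.toList[i.toNat], ?_, ?_⟩
      · have h1 : i.toNat < (m.toList.take K).length := by
          simp only [List.length_take]
          omega
        have h2 := List.getElem_mem h1
        rw [List.getElem_take] at h2
        have h3 := (List.all_eq_true.mp hchars) _ h2
        simp only [Bool.or_eq_true, beq_iff_eq] at h3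
        simp only [pvACGT, List.mem_cons, List.not_mem_nil, or_false]
        tauto
      · have hi' : i = ((i.toNat : Nat) : Int) := by omega
        have hg : PySem.Str.pyGet? m ((i.toNat : Nat) : Int) = some m.toList[i.toNat] := by
          rw [PySem.Str.pyGet?_natCast]
          simp
        rwa [← hi'] at hg
    -- B's value
    have hB : scoringFunction_alt motifs k
        = (motifs.map (fun m => (m.toList.length : Int))).sum
          - ((List.range K).map (fun (j : Nat) => pvMax motifs (j : Int))).sum := by
      cases motifs with
      | nil =>
        have h1 : scoringFunction_alt [] k = 0 := by
          simp [scoringFunction_alt, zipStar]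
        have hpm : ∀ j : Nat, pvMax ([] : List String) (j : Int) = 0 := by
          intro j
          simp [pvMax, pvCnt]
        have h2 : ((List.range K).map (fun (j : Nat) => pvMax ([] : List String) (j : Int))).sum
            = 0 := by
          simp [hpm]
        rw [h1, h2]
        simp
      | cons m0 rest =>
        have hmap : (m0 :: rest).map (fun m => PySem.List.slice m.toList none (some k))
            = (m0 :: rest).map (fun m => m.toList.take K) := by
          apply List.map_congr_left
          intro m _
          rw [PySem.List.slice_to m.toList (le_of_lt hkpos)]
        have hlenr : ∀ r ∈ (m0 :: rest).map (fun m => m.toList.take K), r.length = K := by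
          intro r hr
          obtain ⟨m, hm, rfl⟩ := List.mem_map.mp hr
          have := hlen m hm
          simp only [List.length_take]
          omega
        have hz : zipStar ((m0 :: rest).map (fun m => m.toList.take K))
            = (List.range K).map
                (fun (j : Nat) =>
                  ((m0.toList.take K) :: rest.map (fun m => m.toList.take K)).map
                    (fun r => r.getD j 'A')) := by
          rw [List.map_cons]
          exact pv_zipStar_eq _ _ K (by simpa using hlenr)
        simp only [scoringFunction_alt]
        rw [if_pos hkpos, hmap, hz, pv_foldl_add _ maxACGTCount 0, zero_add, List.map_map]
        have hcols : (List.range K).map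
              (maxACGTCount ∘ fun (j : Nat) =>
                ((m0.toList.take K) :: rest.map (fun m => m.toList.take K)).map
                  (fun r => r.getD j 'A'))
            = (List.range K).map (fun (j : Nat) => pvMax (m0 :: rest) (j : Int)) := by
          apply List.map_congr_left
          intro j hj
          have hjK : j < K := List.mem_range.mp hj
          show maxACGTCount
              (((m0 :: rest).map (fun m => m.toList.take K)).map (fun r => r.getD j 'A'))
            = pvMax (m0 :: rest) (j : Int)
          rw [List.map_map]
          exact pv_maxACGT_eq (m0 :: rest) j K hjK
            (fun m hm => by have := hlen m hm; omega)
        rw [hcols]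
        simp [PySem.Str.len_eq]
    rw [← hk] at hB
    -- A's value
    simp only [scoringFunction]
    rw [pv_consensus_eq motifs k hgood,
      pv_foldl_add motifs
        (fun motif =>
          hammingDistance motif.toList ((PySem.List.pyRange 0 k 1).map (pvE motifs))) 0,
      zero_add, ← hk]
    have hmapA : motifs.map
          (fun m => hammingDistance m.toList ((PySem.List.pyRange 0 (K : Int) 1).map (pvE motifs)))
        = motifs.map
          (fun m => ((m.toList.length : Int) - K)
            + ((PySem.List.pyRange 0 (K : Int) 1).map
                (fun i => if PySem.Str.pyGet? m i ≠ some (pvE motifs i) then (1 : Int) else 0)).sum) := by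
      apply List.map_congr_left
      intro m hm
      exact pv_hamming m K (by have := hlen m hm; omega) (pvE motifs)
    rw [hmapA,
      pv_sum_map_add motifs (fun m => ((m.toList.length : Int) - K))
        (fun m => ((PySem.List.pyRange 0 (K : Int) 1).map
          (fun i => if PySem.Str.pyGet? m i ≠ some (pvE motifs i) then (1 : Int) else 0)).sum),
      pv_sum_comm motifs (PySem.List.pyRange 0 (K : Int) 1)
        (fun m i => if PySem.Str.pyGet? m i ≠ some (pvE motifs i) then (1 : Int) else 0)]
    have hcol : (PySem.List.pyRange 0 (K : Int) 1).map
          (fun i => (motifs.map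
            (fun m => if PySem.Str.pyGet? m i ≠ some (pvE motifs i) then (1 : Int) else 0)).sum)
        = (PySem.List.pyRange 0 (K : Int) 1).map
          (fun i => (motifs.length : Int) - pvMax motifs i) := by
      apply List.map_congr_left
      intro i hi
      have hmem := PySem.List.mem_pyRange_one.mp hi
      rw [pv_col_sum motifs i (pvE motifs i),
        pv_key_pvE motifs i (hgood i hmem.1 (by omega))]
    rw [hcol,
      pv_sum_sub_right motifs (fun m => (m.toList.length : Int)) (K : Int),
      pv_sum_sub_left (PySem.List.pyRange 0 (K : Int) 1) (motifs.length : Int)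
        (fun i => pvMax motifs i),
      hB]
    have hLlen : ((PySem.List.pyRange 0 (K : Int) 1).length : Int) = (K : Int) := by
      simp [PySem.List.length_pyRange_one]
    rw [hLlen]
    have hSM : (PySem.List.pyRange 0 (K : Int) 1).map (fun i => pvMax motifs i)
        = (List.range K).map (fun (j : Nat) => pvMax motifs (j : Int)) := by
      rw [PySem.List.pyRange_one, List.map_map]
      simp
    rw [hSM]
    ring
  · -- k ≤ 0
    have hr : PySem.List.pyRange 0 k 1 = [] := PySem.List.pyRange_one_eq_nil (by omega)
    have hham : ∀ m : String, hammingDistance m.toList ([] : List Char)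
        = (m.toList.length : Int) := by
      intro m
      unfold hammingDistance
      have hmin : min (PySem.List.len m.toList) (PySem.List.len ([] : List Char)) = 0 := by
        simp [PySem.List.len_eq]
      rw [hmin]
      have hr0 : PySem.List.pyRange 0 0 1 = [] := PySem.List.pyRange_one_eq_nil (by omega)
      rw [hr0]
      simp [PySem.List.len_eq]
    have hA : scoringFunction motifs k = (motifs.map (fun m => (m.toList.length : Int))).sum := by
      simp only [scoringFunction, hr, List.foldl_nil]
      rw [pv_foldl_add motifs (fun motif => hammingDistance motif.toList []) 0, zero_add]
      rw [show motifs.map (fun m => hammingDistance m.toList [])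
          = motifs.map (fun m => ((m.toList.length : Int))) from
        List.map_congr_left (fun m _ => hham m)]
    have hB : scoringFunction_alt motifs k
        = (motifs.map (fun m => (m.toList.length : Int))).sum := by
      simp only [scoringFunction_alt, if_neg hkpos, sub_zero]
      simp [PySem.Str.len_eq]
    rw [hA, hB]
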